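-- pv_equiv track=rewrite | github.com/luoning9/quizit | local/split_question_bands.py | projected_shadow_area
-- ===== SOURCE A (Python) =====
-- def projected_shadow_area(components: list[dict[str, int | float]], band_height_px: int) -> int:
--     if band_height_px <= 0 or not components:
--         return 0
--     intervals = sorted(
--         ((int(comp["left"]), int(comp["left"]) + int(comp["width"])) for comp in components if int(comp["width"]) > 0),
--         key=lambda item: (item[0], item[1]),
--     )
--     if not intervals:
--         return 0
--     merged: list[list[int]] = []
--     for start, end in intervals:
--         if not merged or start > merged[-1][1]:
--             merged.append([start, end])
--         else:
--             merged[-1][1] = max(merged[-1][1], end)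
--     shadow_width = sum(max(0, end - start) for start, end in merged)
--     return int(shadow_width * band_height_px)
-- ===== SOURCE B (Python) =====
-- def projected_shadow_area(components: list[dict[str, int | float]], band_height_px: int) -> int:
--     if band_height_px <= 0:
--         return 0
--     events = []
--     for comp in components:
--         if int(comp["width"]) > 0:
--             events.append((int(comp["left"]), 1))
--             events.append((int(comp["left"]) + int(comp["width"]), -1))
--     events.sort(key=lambda event: event[0])
--     total = 0
--     coverage = 0
--     prev_x = 0
--     for x, delta in events:
--         if coverage > 0:
--             total += x - prev_x
--         coverage += delta
--         prev_x = x
--     return int(total * band_height_px)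
-- ===== Notes on version B (the rewrite author's own statement) =====
-- stated objective: alternative
-- what changed: B replaces A's sort-intervals-then-merge-overlapping-intervals-then-sum approach by a sweep line: it emits a (+1) open event and a (-1) close event per positive-width component, sorts the events by coordinate, and sweeps left to right with a coverage counter, accumulating the distance between consecutive event coordinates whenever coverage is positive.
import Mathlib
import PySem

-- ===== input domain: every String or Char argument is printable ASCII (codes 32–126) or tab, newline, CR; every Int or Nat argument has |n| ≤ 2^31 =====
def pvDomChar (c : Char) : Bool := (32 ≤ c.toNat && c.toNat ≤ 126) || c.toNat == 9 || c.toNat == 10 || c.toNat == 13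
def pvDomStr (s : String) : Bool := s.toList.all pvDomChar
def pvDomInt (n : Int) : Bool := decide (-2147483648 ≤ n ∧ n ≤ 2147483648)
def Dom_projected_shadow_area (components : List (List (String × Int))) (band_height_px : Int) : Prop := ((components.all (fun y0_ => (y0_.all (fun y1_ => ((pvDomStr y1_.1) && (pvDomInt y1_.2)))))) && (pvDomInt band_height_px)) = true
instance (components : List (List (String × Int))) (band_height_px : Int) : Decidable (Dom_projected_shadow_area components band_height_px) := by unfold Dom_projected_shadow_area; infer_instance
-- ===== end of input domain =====

-- ===== PORT A =====
-- B replaces A's sort-and-merge of intervals by an event-list sweep (open/close events,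
-- coverage counter); equal return values proved on Pre_ (objective: alternative).

-- comp["left"] / comp["width"]: first-match lookup; stand-in default 0 — the raising
-- (missing-key) inputs are excluded by Pre_ below.
def pvKey (comp : List (String × Int)) (k : String) : Int := (comp.lookup k).getD 0

-- the filtered interval list before sorting:
-- ((int(c["left"]), int(c["left"])+int(c["width"])) for c in components if int(c["width"]) > 0)
def pvRawIntervals (components : List (List (String × Int))) : List (Int × Int) :=
  (components.filter (fun comp => 0 < pvKey comp "width")).map
    (fun comp => (pvKey comp "left", pvKey comp "left" + pvKey comp "width"))

-- sorted(..., key=lambda item: (item[0], item[1]))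
def pvIntervals (components : List (List (String × Int))) : List (Int × Int) :=
  PySem.List.sorted2 (pvRawIntervals components) (fun item => item.1) (fun item => item.2) false

def projected_shadow_area (components : List (List (String × Int))) (band_height_px : Int) : Int :=
  if band_height_px ≤ 0 ∨ components = [] then 0
  else
    let intervals := pvIntervals components
    if intervals = [] then 0
    else
      let merged : List (Int × Int) :=
        intervals.foldl (fun merged iv =>
          match merged.getLast? with
          | none => merged ++ [iv]
          | some last =>
            if last.2 < iv.1 then merged ++ [iv]
            else merged.dropLast ++ [(last.1, max last.2 iv.2)]) []
      let shadow_width := (merged.map (fun b => max 0 (b.2 - b.1))).sum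
      shadow_width * band_height_px

-- ===== PORT B =====
-- the event-building loop: for comp: if width > 0: append (left, +1) and (left+width, -1)
def pvEventsOf (components : List (List (String × Int))) : List (Int × Int) :=
  components.foldl (fun acc comp =>
    if 0 < pvKey comp "width" then
      acc ++ [(pvKey comp "left", 1), (pvKey comp "left" + pvKey comp "width", -1)]
    else acc) []

-- one sweep step over state (total, coverage, prev_x)
def pvSweepStep (st : Int × Int × Int) (e : Int × Int) : Int × Int × Int :=
  (if 0 < st.2.1 then st.1 + (e.1 - st.2.2) else st.1, st.2.1 + e.2, e.1)

def projected_shadow_area_alt (components : List (List (String × Int))) (band_height_px : Int) : Int :=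
  if band_height_px ≤ 0 then 0
  else
    ((PySem.List.sorted (pvEventsOf components) (fun event => event.1) false).foldl
      pvSweepStep ((0 : Int), (0 : Int), (0 : Int))).1 * band_height_px

-- ===== PRECONDITION & SPEC =====
-- Pre_ excludes exactly the inputs on which Python A raises KeyError: band_height_px > 0,
-- components nonempty, and some component lacks "width" (or has positive width but lacks "left").
def Pre_projected_shadow_area (components : List (List (String × Int))) (band_height_px : Int) : Prop :=
  band_height_px ≤ 0 ∨ components = [] ∨
    ∀ comp ∈ components, (comp.lookup "width").isSome = true ∧
      (0 < (comp.lookup "width").getD 0 → (comp.lookup "left").isSome = true)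
instance (components : List (List (String × Int))) (band_height_px : Int) : Decidable (Pre_projected_shadow_area components band_height_px) := by unfold Pre_projected_shadow_area; infer_instance

def pvWitness_projected_shadow_area : (List (List (String × Int))) × Int :=
  ([[("left", 0), ("width", 2)], [("left", 5), ("width", 1)]], 3)

def Spec_projected_shadow_area (components : List (List (String × Int))) (band_height_px : Int) (out : Int) : Prop := out = projected_shadow_area_alt components band_height_px
instance (components : List (List (String × Int))) (band_height_px : Int) (out : Int) : Decidable (Spec_projected_shadow_area components band_height_px out) := by unfold Spec_projected_shadow_area; infer_instance

-- ===== CLAIM (what is proved, stated in full; the proofs are below) =====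
def Claim_equal_projected_shadow_area : Prop := ∀ (components : List (List (String × Int))) (band_height_px : Int), Dom_projected_shadow_area components band_height_px → Pre_projected_shadow_area components band_height_px → Spec_projected_shadow_area components band_height_px (projected_shadow_area components band_height_px)

-- ===== LEMMAS AND PROOFS =====

-- the two events of one interval
def pvEv (iv : Int × Int) : List (Int × Int) := [(iv.1, 1), (iv.2, -1)]

-- the set of covered integer cells of a list of intervals (proof-side only)
noncomputable def covF (ivs : List (Int × Int)) : Finset Int :=
  ivs.foldr (fun iv s => Finset.Ico iv.1 iv.2 ∪ s) ∅

-- A's clipped-accumulation reading of the merge loop (proof-side bridge only)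
def pvClipStep (st : Int × Option Int) (iv : Int × Int) : Int × Option Int :=
  let start := match st.2 with
    | some ce => if iv.1 < ce then ce else iv.1
    | none => iv.1
  if start < iv.2 then (st.1 + (iv.2 - start), some iv.2) else st

-- event/interval counting predicates
def pOpen (q : Int) : Int × Int → Bool := fun e => decide (e.2 = 1) && decide (e.1 ≤ q)
def pClose (q : Int) : Int × Int → Bool := fun e => decide (e.2 = -1) && decide (e.1 ≤ q)
def pStart (q : Int) : Int × Int → Bool := fun iv => decide (iv.1 ≤ q)
def pEnd (q : Int) : Int × Int → Bool := fun iv => decide (iv.2 ≤ q)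
def pIn (q : Int) : Int × Int → Bool := fun iv => decide (iv.1 ≤ q) && decide (q < iv.2)

lemma mem_covF (ivs : List (Int × Int)) (q : Int) :
    q ∈ covF ivs ↔ ∃ iv ∈ ivs, iv.1 ≤ q ∧ q < iv.2 := by
  induction ivs with
  | nil => simp [covF]
  | cons iv tl ih =>
    show q ∈ Finset.Ico iv.1 iv.2 ∪ covF tl ↔ _
    rw [Finset.mem_union, Finset.mem_Ico, ih]
    constructor
    · rintro (h | ⟨j, hj, hb⟩)
      · exact ⟨iv, by simp, h⟩
      · exact ⟨j, by simp [hj], hb⟩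
    · rintro ⟨j, hj, hb⟩
      rcases List.mem_cons.mp hj with rfl | hj'
      · exact Or.inl hb
      · exact Or.inr ⟨j, hj', hb⟩

lemma covF_append (xs ys : List (Int × Int)) :
    covF (xs ++ ys) = covF xs ∪ covF ys := by
  induction xs with
  | nil => simp [covF]
  | cons x tl ih =>
    show Finset.Ico x.1 x.2 ∪ covF (tl ++ ys) = (Finset.Ico x.1 x.2 ∪ covF tl) ∪ covF ys
    rw [ih, Finset.union_assoc]

lemma covF_eq_of_mem_eq (xs ys : List (Int × Int)) (h : ∀ iv, iv ∈ xs ↔ iv ∈ ys) :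
    covF xs = covF ys := by
  apply Finset.ext
  intro q
  rw [mem_covF, mem_covF]
  constructor
  · rintro ⟨iv, hm, hb⟩; exact ⟨iv, (h iv).mp hm, hb⟩
  · rintro ⟨iv, hm, hb⟩; exact ⟨iv, (h iv).mpr hm, hb⟩

-- membership in covF from a positive pIn count, and back
lemma covF_of_countP_pos (ivs : List (Int × Int)) (q : Int)
    (h : ivs.countP (pIn q) ≠ 0) : q ∈ covF ivs := by
  rw [mem_covF]
  by_contra hq
  apply h
  rw [List.countP_eq_zero]
  intro iv hiv
  simp only [pIn, Bool.and_eq_true, decide_eq_true_eq, not_and]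
  intro h1 h2
  exact hq ⟨iv, hiv, h1, h2⟩

lemma countP_pos_of_covF (ivs : List (Int × Int)) (q : Int)
    (h : q ∈ covF ivs) : ivs.countP (pIn q) ≠ 0 := by
  rw [mem_covF] at h
  rcases h with ⟨iv, hiv, h1, h2⟩
  intro hz
  rw [List.countP_eq_zero] at hz
  have := hz iv hiv
  simp [pIn, h1, h2] at this

-- events loop = flatMap of pvEv over the raw intervals
lemma foldl_append_if_flatMap {α β : Type} (p : α → Prop) [DecidablePred p] (g : α → List β) :
    ∀ (l : List α) (acc : List β),
      l.foldl (fun acc x => if p x then acc ++ g x else acc) acc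
        = acc ++ (l.filter (fun x => decide (p x))).flatMap g := by
  intro l
  induction l with
  | nil => simp
  | cons x tl ih =>
    intro acc
    by_cases hp : p x
    · simp [hp, ih]
    · simp [hp, ih]

lemma eventsOf_eq (components : List (List (String × Int))) :
    pvEventsOf components = (pvRawIntervals components).flatMap pvEv := by
  unfold pvEventsOf pvRawIntervals
  rw [foldl_append_if_flatMap (fun comp => 0 < pvKey comp "width")
    (fun comp => [(pvKey comp "left", (1 : Int)), (pvKey comp "left" + pvKey comp "width", -1)]),
    List.flatMap_map]
  simp [pvEv]

-- every raw/sorted interval has positive width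
lemma pvRawIntervals_pos (components : List (List (String × Int))) :
    ∀ iv ∈ pvRawIntervals components, iv.1 < iv.2 := by
  intro iv hiv
  rcases List.mem_map.mp hiv with ⟨comp, hcomp, rfl⟩
  have := List.of_mem_filter hcomp
  simp only [decide_eq_true_eq] at this
  omega

lemma pvIntervals_pos (components : List (List (String × Int))) :
    ∀ iv ∈ pvIntervals components, iv.1 < iv.2 := by
  intro iv hiv
  exact pvRawIntervals_pos components iv
    ((PySem.List.sorted2_perm _ _ _ _).mem_iff.mp hiv)

-- insertion sort with an asymmetric transitive 'before' yields a Pairwise-ordered list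
lemma insertBy_pairwise {α : Type} (before : α → α → Bool)
    (hasym : ∀ a b, before a b = true → before b a = false)
    (htrans : ∀ a b c, before a b = true → before b c = true → before a c = true)
    (x : α) (ys : List α) (hys : ys.Pairwise (fun a b => before b a = false)) :
    (PySem.List.insertBy before x ys).Pairwise (fun a b => before b a = false) := by
  induction ys with
  | nil => simp [PySem.List.insertBy]
  | cons y ys ih =>
    rcases List.pairwise_cons.mp hys with ⟨hy, hys'⟩
    by_cases hb : before x y
    · rw [show PySem.List.insertBy before x (y :: ys) = x :: y :: ys by
        simp [PySem.List.insertBy, hb]]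
      refine List.pairwise_cons.mpr ⟨?_, hys⟩
      intro z hz
      rcases List.mem_cons.mp hz with rfl | hz'
      · exact hasym _ _ hb
      · by_contra hzx
        have hzx' : before z x = true := by
          cases h : before z x
          · exact absurd h hzx
          · rfl
        have := htrans z x y hzx' hb
        rw [hy z hz'] at this
        exact Bool.noConfusion this
    · rw [show PySem.List.insertBy before x (y :: ys)
          = y :: PySem.List.insertBy before x ys by
        simp [PySem.List.insertBy, hb]]
      refine List.pairwise_cons.mpr ⟨?_, ih hys'⟩
      intro z hz
      rcases (PySem.List.mem_insertBy before x z ys).mp hz with rfl | hz'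
      · cases h : before z y
        · rfl
        · exact absurd h (by simp [hb])
      · exact hy z hz'

lemma foldl_insertBy_pairwise {α : Type} (before : α → α → Bool)
    (hasym : ∀ a b, before a b = true → before b a = false)
    (htrans : ∀ a b c, before a b = true → before b c = true → before a c = true) :
    ∀ (xs acc : List α), acc.Pairwise (fun a b => before b a = false) →
      (xs.foldl (fun acc x => PySem.List.insertBy before x acc) acc).Pairwise
        (fun a b => before b a = false) := by
  intro xs
  induction xs with
  | nil => intro acc h; simpa using h
  | cons x tl ih =>
    intro acc h
    exact ih _ (insertBy_pairwise before hasym htrans x acc h)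

lemma pvIntervals_pairwise (components : List (List (String × Int))) :
    (pvIntervals components).Pairwise (fun a b => a.1 ≤ b.1) := by
  have h := foldl_insertBy_pairwise
    (fun a b : Int × Int => decide (a.1 < b.1) || (!decide (b.1 < a.1) && decide (a.2 < b.2)))
    (by intro a b hab; simp at hab ⊢; omega)
    (by intro a b c hab hbc; simp at hab hbc ⊢; omega)
    (pvRawIntervals components) [] (by simp)
  have heq : pvIntervals components
      = (pvRawIntervals components).foldl
          (fun acc x => PySem.List.insertBy
            (fun a b : Int × Int => decide (a.1 < b.1) || (!decide (b.1 < a.1) && decide (a.2 < b.2)))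
            x acc) [] := rfl
  rw [heq]
  exact h.imp (by intro a b hab; simp at hab; omega)

-- main loop correspondence: A's merged list vs the clip-fold state
lemma loop_eq (l : List (Int × Int)) :
    (∀ iv ∈ l, iv.1 < iv.2) →
    ∀ (m : List (Int × Int)) (ls le t : Int),
    (∀ b ∈ m, b.1 ≤ b.2) → m.getLast? = some (ls, le) →
    t = (m.map (fun b => max 0 (b.2 - b.1))).sum →
    ((l.foldl (fun merged iv =>
        match merged.getLast? with
        | none => merged ++ [iv]
        | some last =>
          if last.2 < iv.1 then merged ++ [iv]
          else merged.dropLast ++ [(last.1, max last.2 iv.2)]) m).map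
      (fun b => max 0 (b.2 - b.1))).sum
      = (l.foldl pvClipStep (t, some le)).1 := by
  induction l with
  | nil => intro _ m ls le t hb hlast ht; simpa using ht.symm
  | cons iv tl ih =>
    intro hpos m ls le t hb hlast ht
    have hivpos : iv.1 < iv.2 := hpos iv (by simp)
    have htl : ∀ x ∈ tl, x.1 < x.2 := fun x hx => hpos x (by simp [hx])
    rcases List.getLast?_eq_some_iff.mp hlast with ⟨m', hm'⟩
    have hdrop : m.dropLast = m' := by rw [hm']; simp
    have hlsle : ls ≤ le := hb (ls, le) (by rw [hm']; simp)
    have hsum_drop : t = ((m'.map (fun b => max 0 (b.2 - b.1))).sum) + (le - ls) := by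
      rw [ht, hm']
      simp [List.map_append]
      omega
    simp only [List.foldl_cons, hlast]
    by_cases hgap : le < iv.1
    · rw [if_pos hgap]
      have h1 : ¬ (iv.1 < le) := by omega
      have hstep : pvClipStep (t, some le) iv = (t + (iv.2 - iv.1), some iv.2) := by
        simp [pvClipStep, h1, hivpos]
      rw [hstep]
      apply ih htl (m ++ [iv]) iv.1 iv.2
      · intro b hbm
        rcases List.mem_append.mp hbm with h | h
        · exact hb _ h
        · simp at h; subst h; omega
      · simp
      · rw [ht]; simp; omega
    · rw [if_neg hgap]
      have hstep : pvClipStep (t, some le) iv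
          = (t + (max le iv.2 - le), some (max le iv.2)) := by
        by_cases he : le < iv.2
        · have hmax : max le iv.2 = iv.2 := by omega
          rw [hmax]
          by_cases hsc : iv.1 < le
          · simp [pvClipStep, hsc, he]
          · have hiv1 : iv.1 = le := by omega
            simp [pvClipStep, hiv1, he]
        · have hmax : max le iv.2 = le := by omega
          rw [hmax]
          by_cases hsc : iv.1 < le
          · simp [pvClipStep, hsc, he]
          · have h2 : ¬ (iv.1 < iv.2) := by omega
            simp [pvClipStep, hsc, h2]
      rw [hstep, hdrop]
      apply ih htl (m' ++ [(ls, max le iv.2)]) ls (max le iv.2)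
      · intro b hbm
        rcases List.mem_append.mp hbm with h | h
        · exact hb _ (by rw [hm']; exact List.mem_append.mpr (Or.inl h))
        · simp at h; subst h; simp; omega
      · simp
      · rw [hsum_drop]; simp; omega

-- the clip-fold over a start-sorted positive interval list measures the union
lemma clip_inv (L : List (Int × Int)) :
    L.Pairwise (fun a b => a.1 ≤ b.1) → (∀ iv ∈ L, iv.1 < iv.2) → L ≠ [] →
    ∃ E, L.foldl pvClipStep (0, none) = (((covF L).card : Int), some E) ∧
      (∀ iv ∈ L, iv.2 ≤ E) ∧ (∃ j ∈ L, j.2 = E) := by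
  induction L using List.reverseRecOn with
  | nil => intro _ _ hne; exact absurd rfl hne
  | append_singleton L iv ih =>
    intro hpw hpos _
    have hivpos : iv.1 < iv.2 := hpos iv (by simp)
    by_cases hL : L = []
    · subst hL
      refine ⟨iv.2, ?_, by simp, ⟨iv, by simp, rfl⟩⟩
      have hcard : ((covF [iv]).card : Int) = iv.2 - iv.1 := by
        show (((Finset.Ico iv.1 iv.2 ∪ ∅).card : Int)) = _
        rw [Finset.union_empty, Int.card_Ico]
        omega
      simp only [List.nil_append, List.foldl_cons, List.foldl_nil]
      rw [hcard]
      simp [pvClipStep, hivpos]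
    · rcases List.pairwise_append.mp hpw with ⟨hpwL, _, hcross⟩
      obtain ⟨E, hfold, hle, j, hjmem, hjE⟩ :=
        ih hpwL (fun x hx => hpos x (List.mem_append.mpr (Or.inl hx))) hL
      have hjle : j.1 ≤ iv.1 := hcross j hjmem iv (by simp)
      have hjpos : j.1 < j.2 := hpos j (List.mem_append.mpr (Or.inl hjmem))
      set M := max iv.1 E with hMdef
      have hM1 : iv.1 ≤ M := le_max_left _ _
      have hM2 : E ≤ M := le_max_right _ _
      have hifM : (if iv.1 < E then E else iv.1) = M := by
        split_ifs with h
        · rw [hMdef]; exact (max_eq_right h.le).symm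
        · rw [hMdef]; exact (max_eq_left (by omega)).symm
      have hred : ∀ c : Int, pvClipStep (c, some E) iv
          = if (if iv.1 < E then E else iv.1) < iv.2
            then (c + (iv.2 - (if iv.1 < E then E else iv.1)), some iv.2)
            else (c, some E) := fun c => rfl
      have hset : covF (L ++ [iv]) = covF L ∪ Finset.Ico M iv.2 := by
        rw [covF_append]
        have hiv : covF [iv] = Finset.Ico iv.1 iv.2 := by
          show Finset.Ico iv.1 iv.2 ∪ ∅ = _
          rw [Finset.union_empty]
        rw [hiv]
        apply Finset.ext
        intro q
        simp only [Finset.mem_union, Finset.mem_Ico]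
        constructor
        · rintro (h | ⟨h1, h2⟩)
          · exact Or.inl h
          · by_cases hE : q < E
            · exact Or.inl ((mem_covF L q).mpr ⟨j, hjmem, by omega, by omega⟩)
            · exact Or.inr ⟨max_le h1 (by omega), h2⟩
        · rintro (h | ⟨h1, h2⟩)
          · exact Or.inl h
          · exact Or.inr ⟨le_trans hM1 h1, h2⟩
      have hdisj : Disjoint (covF L) (Finset.Ico M iv.2) := by
        rw [Finset.disjoint_left]
        intro q hq hq2
        rw [mem_covF] at hq
        rcases hq with ⟨k, hk, hk1, hk2⟩
        rw [Finset.mem_Ico] at hq2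
        have := hle k hk
        omega
      rw [List.foldl_append, hfold]
      simp only [List.foldl_cons, List.foldl_nil]
      rw [hred, hifM]
      by_cases hext : E < iv.2
      · have hMlt : M < iv.2 := by rw [hMdef]; exact max_lt hivpos hext
        rw [if_pos hMlt]
        refine ⟨iv.2, ?_, ?_, ⟨iv, by simp, rfl⟩⟩
        · have hcard : ((covF (L ++ [iv])).card : Int)
              = ((covF L).card : Int) + (iv.2 - M) := by
            rw [hset, Finset.card_union_of_disjoint hdisj, Int.card_Ico]
            push_cast [Int.toNat_of_nonneg (by omega : (0:Int) ≤ iv.2 - M)]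
            ring
          rw [hcard]
        · intro k hk
          rcases List.mem_append.mp hk with h | h
          · have := hle k h; omega
          · simp at h; subst h; omega
      · have hMge : ¬ M < iv.2 := by omega
        rw [if_neg hMge]
        refine ⟨E, ?_, ?_, ⟨j, List.mem_append.mpr (Or.inl hjmem), hjE⟩⟩
        · have hcard : ((covF (L ++ [iv])).card : Int) = ((covF L).card : Int) := by
            rw [hset, Finset.Ico_eq_empty hMge, Finset.union_empty]
          rw [hcard]
        · intro k hk
          rcases List.mem_append.mp hk with h | h
          · exact hle k h
          · simp at h; subst h; omega

-- counting bridges between events and intervals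
lemma countP_flatMap_open (l : List (Int × Int)) (q : Int) :
    (l.flatMap pvEv).countP (pOpen q) = l.countP (pStart q) := by
  induction l with
  | nil => rfl
  | cons iv tl ih =>
    simp only [List.flatMap_cons, List.countP_append, ih, List.countP_cons, pvEv]
    by_cases h : iv.1 ≤ q <;> simp [pOpen, pStart, h, List.countP_cons] <;> omega

lemma countP_flatMap_close (l : List (Int × Int)) (q : Int) :
    (l.flatMap pvEv).countP (pClose q) = l.countP (pEnd q) := by
  induction l with
  | nil => rfl
  | cons iv tl ih =>
    simp only [List.flatMap_cons, List.countP_append, ih, List.countP_cons, pvEv]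
    by_cases h : iv.2 ≤ q <;> simp [pClose, pEnd, h, List.countP_cons] <;> omega

lemma countP_split (l : List (Int × Int)) (q : Int) (hpos : ∀ iv ∈ l, iv.1 < iv.2) :
    l.countP (pStart q) = l.countP (pIn q) + l.countP (pEnd q) := by
  induction l with
  | nil => rfl
  | cons iv tl ih =>
    have h1 := hpos iv (by simp)
    have ih' := ih (fun x hx => hpos x (by simp [hx]))
    by_cases ha : iv.1 ≤ q <;> by_cases hb : q < iv.2 <;> by_cases hc2 : iv.2 ≤ q <;>
      simp [List.countP_cons, pStart, pIn, pEnd, ha, hb, hc2, ih'] <;> omega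

-- the sweep over the sorted event list measures the union of the intervals
lemma sweep_inv (ivs es : List (Int × Int))
    (hperm : es.Perm (ivs.flatMap pvEv))
    (hsorted : es.Pairwise (fun a b => a.1 ≤ b.1))
    (hpos : ∀ iv ∈ ivs, iv.1 < iv.2) :
    ∀ (R P : List (Int × Int)) (t c p : Int),
      es = P ++ R →
      c = (P.countP (fun e => decide (e.2 = 1)) : Int)
            - (P.countP (fun e => decide (e.2 = -1)) : Int) →
      (P = [] → t = 0) →
      (P ≠ [] → (∃ e0 ∈ P, p = e0.1) ∧ (∀ e' ∈ P, e'.1 ≤ p) ∧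
        t = (((covF ivs).filter (fun q => q < p)).card : Int)) →
      (R.foldl pvSweepStep (t, c, p)).1 = ((covF ivs).card : Int) := by
  intro R
  induction R with
  | nil =>
    intro P t c p hsplit hc ht0 htpf
    simp only [List.foldl_nil]
    by_cases hP : P = []
    · subst hP
      simp only [List.nil_append] at hsplit
      subst hsplit
      cases hivs : ivs with
      | nil => simp [covF, ht0 rfl]
      | cons iv tl =>
        exfalso
        have hm : (iv.1, (1 : Int)) ∈ ivs.flatMap pvEv := by
          simp [hivs, pvEv]
        have := hperm.mem_iff.mpr hm
        simp at this
    · obtain ⟨⟨e0, he0, hpe⟩, hcoord, ht⟩ := htpf hP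
      rw [List.append_nil] at hsplit
      have hfull : (covF ivs).filter (fun q => q < p) = covF ivs := by
        apply Finset.filter_eq_self.mpr
        intro q hq
        rw [mem_covF] at hq
        rcases hq with ⟨iv, hiv, h1, h2⟩
        have hm : (iv.2, (-1 : Int)) ∈ ivs.flatMap pvEv := by
          rw [List.mem_flatMap]
          exact ⟨iv, hiv, by simp [pvEv]⟩
        have hmes : (iv.2, (-1 : Int)) ∈ P := by
          rw [← hsplit]
          exact hperm.mem_iff.mpr hm
        have := hcoord _ hmes
        simp at this
        omega
      rw [ht, hfull]
  | cons e R' ih =>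
    intro P t c p hsplit hc ht0 htpf
    have hpw : (P ++ e :: R').Pairwise (fun a b => a.1 ≤ b.1) := hsplit ▸ hsorted
    rcases List.pairwise_append.mp hpw with ⟨hpwP, hpwR, hcross⟩
    have hR'ge : ∀ b ∈ R', e.1 ≤ b.1 := fun b hb => List.rel_of_pairwise_cons hpwR hb
    have hmemes : e ∈ es := hsplit ▸ List.mem_append.mpr (Or.inr (by simp))
    have hd : e.2 = 1 ∨ e.2 = -1 := by
      have := hperm.mem_iff.mp hmemes
      rw [List.mem_flatMap] at this
      rcases this with ⟨iv, _, hm⟩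
      simp [pvEv] at hm
      rcases hm with ⟨_, h⟩ | ⟨_, h⟩ <;> omega
    -- the coverage count between the previous and the current coordinate
    have hcnt : ∀ q : Int, (∀ a ∈ P, a.1 ≤ q) → q < e.1 →
        (ivs.countP (pIn q) : Int) = c := by
      intro q hq1 hq2
      have hzero : ∀ pr : Int × Int → Bool,
          (∀ x, pr x = true → x.1 ≤ q) → (e :: R').countP pr = 0 := by
        intro pr hpr
        rw [List.countP_eq_zero]
        intro a ha
        intro hpa
        have haq := hpr a hpa
        rcases List.mem_cons.mp ha with rfl | ha'
        · omega
        · have := hR'ge a ha'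
          omega
      have hopen : ivs.countP (pStart q) = P.countP (fun e => decide (e.2 = 1)) := by
        rw [← countP_flatMap_open, ← hperm.countP_eq, hsplit, List.countP_append,
          hzero (pOpen q) (by intro x hx; simp [pOpen] at hx; omega)]
        rw [Nat.add_zero]
        apply List.countP_congr
        intro a ha
        have := hq1 a ha
        simp [pOpen, this]
      have hclose : ivs.countP (pEnd q) = P.countP (fun e => decide (e.2 = -1)) := by
        rw [← countP_flatMap_close, ← hperm.countP_eq, hsplit, List.countP_append,
          hzero (pClose q) (by intro x hx; simp [pClose] at hx; omega)]
        rw [Nat.add_zero]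
        apply List.countP_congr
        intro a ha
        have := hq1 a ha
        simp [pClose, this]
      have hsplitc := countP_split ivs q hpos
      rw [hopen, hclose] at hsplitc
      rw [hc]
      omega
    simp only [List.foldl_cons]
    have hstep : pvSweepStep (t, c, p) e
        = ((if 0 < c then t + (e.1 - p) else t), c + e.2, e.1) := rfl
    rw [hstep]
    apply ih (P ++ [e])
    · rw [hsplit, List.append_assoc]; rfl
    · rw [List.countP_append, List.countP_append]
      rcases hd with h | h
      · have o1 : [e].countP (fun e => decide (e.2 = 1)) = 1 := by simp [List.countP_cons, h]
        have o2 : [e].countP (fun e => decide (e.2 = -1)) = 0 := by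
          simp [List.countP_cons, h]
        rw [o1, o2, h]
        push_cast
        omega
      · have o1 : [e].countP (fun e => decide (e.2 = 1)) = 0 := by
          simp [List.countP_cons, h]
        have o2 : [e].countP (fun e => decide (e.2 = -1)) = 1 := by simp [List.countP_cons, h]
        rw [o1, o2, h]
        push_cast
        omega
    · intro h; simp at h
    · intro _
      refine ⟨⟨e, by simp, rfl⟩, ?_, ?_⟩
      · intro e' he'
        rcases List.mem_append.mp he' with h | h
        · exact hcross e' h e (by simp)
        · simp at h; subst h; exact le_refl _
      · by_cases hP : P = []
        · have hc0 : c = 0 := by subst hP; simp at hc; exact hc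
          rw [hc0]
          simp only [lt_irrefl, if_false]
          rw [ht0 hP]
          have hempty : (covF ivs).filter (fun q => q < e.1) = ∅ := by
            rw [Finset.filter_eq_empty_iff]
            intro q hq
            rw [mem_covF] at hq
            rcases hq with ⟨iv, hiv, h1, h2⟩
            have hm : (iv.1, (1 : Int)) ∈ ivs.flatMap pvEv := by
              rw [List.mem_flatMap]
              exact ⟨iv, hiv, by simp [pvEv]⟩
            have hmes : (iv.1, (1 : Int)) ∈ es := hperm.mem_iff.mpr hm
            rw [hsplit, hP, List.nil_append] at hmes
            rcases List.mem_cons.mp hmes with hh | hh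
            · have h1' : iv.1 = e.1 := by rw [← hh]
              omega
            · have := hR'ge _ hh
              simp at this
              omega
          rw [hempty]
          simp
        · obtain ⟨⟨e0, he0, hpe⟩, hcoordP, ht⟩ := htpf hP
          have hpe1 : p ≤ e.1 := by
            rw [hpe]
            exact hcross e0 he0 e (by simp)
          by_cases hcpos : 0 < c
          · rw [if_pos hcpos]
            have hsub : ∀ q, p ≤ q → q < e.1 → q ∈ covF ivs := by
              intro q h1 h2
              apply covF_of_countP_pos
              have := hcnt q (fun a ha => le_trans (hcoordP a ha) h1) h2
              omega
            have hun : (covF ivs).filter (fun q => q < e.1)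
                = (covF ivs).filter (fun q => q < p) ∪ Finset.Ico p e.1 := by
              apply Finset.ext
              intro q
              simp only [Finset.mem_filter, Finset.mem_union, Finset.mem_Ico]
              constructor
              · rintro ⟨hq, hqe⟩
                by_cases hqp : q < p
                · exact Or.inl ⟨hq, hqp⟩
                · exact Or.inr ⟨by omega, hqe⟩
              · rintro (⟨hq, hqp⟩ | ⟨h1, h2⟩)
                · exact ⟨hq, by omega⟩
                · exact ⟨hsub q h1 h2, h2⟩
            have hdisj : Disjoint ((covF ivs).filter (fun q => q < p)) (Finset.Ico p e.1) := by
              rw [Finset.disjoint_left]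
              intro q hq hq2
              rw [Finset.mem_filter] at hq
              rw [Finset.mem_Ico] at hq2
              omega
            rw [hun, Finset.card_union_of_disjoint hdisj, Int.card_Ico, ht]
            push_cast [Int.toNat_of_nonneg (by omega : (0:Int) ≤ e.1 - p)]
            ring
          · rw [if_neg hcpos]
            have heq : (covF ivs).filter (fun q => q < e.1)
                = (covF ivs).filter (fun q => q < p) := by
              apply Finset.ext
              intro q
              simp only [Finset.mem_filter]
              constructor
              · rintro ⟨hq, hqe⟩
                refine ⟨hq, ?_⟩
                by_contra hqp
                have hcq := hcnt q (fun a ha => le_trans (hcoordP a ha) (by omega)) hqe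
                have := countP_pos_of_covF ivs q hq
                omega
              · rintro ⟨hq, hqp⟩
                exact ⟨hq, by omega⟩
            rw [heq, ht]

-- ===== VERDICT (by name: the statement is the Claim_ definition above) =====
theorem projected_shadow_area_spec : Claim_equal_projected_shadow_area := by
  intro components band_height_px _ _
  unfold Spec_projected_shadow_area projected_shadow_area projected_shadow_area_alt
  by_cases hb : band_height_px ≤ 0
  · rw [if_pos (Or.inl hb), if_pos hb]
  · rw [if_neg hb]
    have hBcore : ((PySem.List.sorted (pvEventsOf components) (fun event => event.1) false).foldl
        pvSweepStep ((0 : Int), (0 : Int), (0 : Int))).1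
        = ((covF (pvRawIntervals components)).card : Int) := by
      apply sweep_inv (pvRawIntervals components)
        (PySem.List.sorted (pvEventsOf components) (fun event => event.1) false)
        (by rw [← eventsOf_eq]; exact PySem.List.sorted_perm _ _ _)
        (PySem.List.sorted_pairwise _ _)
        (pvRawIntervals_pos components)
        _ [] 0 0 0 rfl (by simp) (fun _ => rfl)
      intro h; exact absurd rfl h
    by_cases hc : components = []
    · rw [if_pos (Or.inr hc)]
      subst hc
      rw [hBcore]
      have : pvRawIntervals ([] : List (List (String × Int))) = [] := rfl
      rw [this]
      simp [covF]
    · rw [if_neg (by tauto)]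
      have hpermI : (pvIntervals components).Perm (pvRawIntervals components) :=
        PySem.List.sorted2_perm _ _ _ _
      cases hI : pvIntervals components with
      | nil =>
        rw [if_pos rfl, hBcore]
        have hraw : pvRawIntervals components = [] := by
          have := hI ▸ hpermI
          exact this.symm.eq_nil
        rw [hraw]
        simp [covF]
      | cons iv rest =>
        rw [if_neg (by simp)]
        have hpos := pvIntervals_pos components
        rw [hI] at hpos
        have hivpos : iv.1 < iv.2 := hpos iv (by simp)
        simp only [List.foldl_cons, List.getLast?_nil, List.nil_append]
        have hAcore : ((pvIntervals components).foldl pvClipStep (0, none)).1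
            = ((covF (pvIntervals components)).card : Int) := by
          obtain ⟨E, hfold, _, _⟩ := clip_inv (pvIntervals components)
            (pvIntervals_pairwise components) (pvIntervals_pos components)
            (by rw [hI]; simp)
          rw [hfold]
        have hstep0 : pvClipStep (0, none) iv = (iv.2 - iv.1, some iv.2) := by
          simp only [pvClipStep]
          rw [if_pos hivpos]
          simp
        have hA : ((rest.foldl (fun merged iv =>
            match merged.getLast? with
            | none => merged ++ [iv]
            | some last =>
              if last.2 < iv.1 then merged ++ [iv]
              else merged.dropLast ++ [(last.1, max last.2 iv.2)]) [iv]).map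
            (fun b => max 0 (b.2 - b.1))).sum
            = ((covF (pvIntervals components)).card : Int) := by
          rw [loop_eq rest (fun x hx => hpos x (by simp [hx])) [iv] iv.1 iv.2
            (iv.2 - iv.1) (by intro b hb'; simp at hb'; subst hb'; omega) (by simp)
            (by simp; omega)]
          rw [← hAcore, hI]
          simp only [List.foldl_cons, hstep0]
        rw [hA, hBcore]
        have hcov : covF (pvIntervals components) = covF (pvRawIntervals components) :=
          covF_eq_of_mem_eq _ _ (fun x => hpermI.mem_iff)
        rw [hcov]
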